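-- pv_equiv track=rewrite | github.com/SergioMarti97/SistemasBioinformaticos-Prog | problemas/problemas11162021.py | puntacion_y_consenso_dic
-- ===== SOURCE A (Python) =====
-- def puntacion_y_consenso_dic(motifs, k):
--     # Definimos el profile
--     profile = {
--         'A' : [],
--         'C' : [],
--         'G' : [],
--         'T' : []
--     }
--
--     # Inicializamos el profile
--     for i in range(k):
--         for key in profile.keys():
--             profile[key].append(0)
--
--     # Calculamos los valores de profile
--     for motif in motifs:
--         for i in range(k):
--             profile[motif[i]][i] += 1
--
--     # Calcular la puntuación y el la secuencia consenso
--     score = 0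
--     consense = ""
--     for col in range(k):
--         max = 0
--         for key, value in profile.items():
--             if value[col] > max:
--                 max = value[col]
--                 base = key
--         score += max
--         consense += base
--
--     # Calcular la puntuación y el consenso
--     return (score, consense)
-- ===== SOURCE B (Python) =====
-- def puntacion_y_consenso_dic(motifs, k):
--     # Per-column pass: count the column's characters directly and pick the
--     # first base (in A,C,G,T order) with the highest count.
--     score = 0
--     consense = ""
--     for col in range(k):
--         column = [m[col] for m in motifs]
--         best = max("ACGT", key=column.count)
--         score += column.count(best)
--         consense += best
--     return (score, consense)
-- ===== Notes on version B (the rewrite author's own statement) =====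
-- stated objective: simpler
-- what changed: B drops A's persistent 4xk profile dict (built in two staged passes and then scanned): it makes a single pass over the columns, extracts each column, counts it directly with list.count, and picks the first best base with max('ACGT', key=column.count); Pre_ excludes exactly the inputs where A raises (with k > 0: an empty motif list, a motif shorter than k, or a non-ACGT character among a motif's first k positions).
import Mathlib
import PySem

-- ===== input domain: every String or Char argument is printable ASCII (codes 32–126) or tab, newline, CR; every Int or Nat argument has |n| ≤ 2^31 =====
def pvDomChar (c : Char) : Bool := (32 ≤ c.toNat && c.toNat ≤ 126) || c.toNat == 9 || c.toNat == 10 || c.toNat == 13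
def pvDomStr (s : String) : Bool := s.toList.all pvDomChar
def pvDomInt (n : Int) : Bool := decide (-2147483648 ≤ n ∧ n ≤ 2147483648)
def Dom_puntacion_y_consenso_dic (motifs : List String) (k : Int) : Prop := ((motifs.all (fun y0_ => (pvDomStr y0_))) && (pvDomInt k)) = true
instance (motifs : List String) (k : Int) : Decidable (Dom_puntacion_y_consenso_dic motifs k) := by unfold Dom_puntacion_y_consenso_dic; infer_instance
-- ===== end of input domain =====

-- B replaces A's persistent 4×k profile dict by a single per-column pass (count the
-- column, pick the first best base with max-by-key); objective: simpler.

-- ===== PORT A =====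
-- A's three loop phases, named for the proofs; the code of each is A's loop verbatim.
def pvAInit (k : Int) : PySem.Dict Char (List Int) :=
  -- profile = {'A':[],'C':[],'G':[],'T':[]}; for i in range(k): for key in profile.keys(): profile[key].append(0)
  (PySem.List.pyRange 0 k).foldl
    (fun d _ => d.keys.foldl (fun d key => d.modify key [] (fun l => l ++ [0])) d)
    (PySem.Dict.ofList [('A', []), ('C', []), ('G', []), ('T', [])])

def pvAFill (motifs : List String) (k : Int) (d0 : PySem.Dict Char (List Int)) :
    PySem.Dict Char (List Int) :=
  -- for motif in motifs: for i in range(k): profile[motif[i]][i] += 1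
  -- (motif[i] out of range / key not present raise in Python; such inputs are outside Pre_)
  motifs.foldl
    (fun d motif => (PySem.List.pyRange 0 k).foldl
      (fun d i =>
        d.modify ((PySem.Str.pyGet? motif i).getD ' ') []
          (fun l => PySem.List.pySetD l i (PySem.List.pyGetD l i 0 + 1))) d) d0

def pvAScore (profile : PySem.Dict Char (List Int)) (k : Int) : Int × String :=
  -- score = 0; consense = ""; for col in range(k): max = 0; for key, value in profile.items(): …
  -- Python's `base` starts unassigned (UnboundLocalError outside Pre_); carried as third component
  let st := (PySem.List.pyRange 0 k).foldl
    (fun (st : Int × List Char × Char) col =>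
      let r := profile.items.foldl
        (fun (p : Int × Char) kv =>
          if p.1 < PySem.List.pyGetD kv.2 col 0 then (PySem.List.pyGetD kv.2 col 0, kv.1) else p)
        (0, st.2.2)
      (st.1 + r.1, st.2.1 ++ [r.2], r.2))
    (0, ([] : List Char), 'A')
  (st.1, String.ofList st.2.1)

def puntacion_y_consenso_dic (motifs : List String) (k : Int) : Int × String :=
  pvAScore (pvAFill motifs k (pvAInit k)) k

-- ===== PORT B =====
def puntacion_y_consenso_dic_alt (motifs : List String) (k : Int) : Int × String :=
  let st := (PySem.List.pyRange 0 k).foldl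
    (fun (st : Int × List Char) col =>
      let column := motifs.map (fun m => (PySem.Str.pyGet? m col).getD ' ')
      let best := (PySem.List.max? ['A', 'C', 'G', 'T'] (fun b => column.count b)).getD 'A'
      (st.1 + (column.count best : Int), st.2 ++ [best]))
    ((0 : Int), ([] : List Char))
  (st.1, String.ofList st.2)

-- ===== PRECONDITION & SPEC =====
-- Pre_ excludes exactly the inputs where A raises: with k > 0, an empty motif list
-- (UnboundLocalError), a motif shorter than k (IndexError), or a non-ACGT character in
-- the first k positions of a motif (KeyError).
def Pre_puntacion_y_consenso_dic (motifs : List String) (k : Int) : Prop :=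
  k ≤ 0 ∨ (motifs ≠ [] ∧
    (motifs.all (fun m => decide (k ≤ (m.toList.length : Int)) &&
      (m.toList.take k.toNat).all (fun c => (['A','C','G','T'] : List Char).contains c))) = true)
instance (motifs : List String) (k : Int) : Decidable (Pre_puntacion_y_consenso_dic motifs k) := by
  unfold Pre_puntacion_y_consenso_dic; infer_instance
def pvWitness_puntacion_y_consenso_dic : List String × Int := (["ACG", "ATG", "CTG"], 3)

def Spec_puntacion_y_consenso_dic (motifs : List String) (k : Int) (out : Int × String) : Prop := out = puntacion_y_consenso_dic_alt motifs k
instance (motifs : List String) (k : Int) (out : Int × String) : Decidable (Spec_puntacion_y_consenso_dic motifs k out) := by unfold Spec_puntacion_y_consenso_dic; infer_instance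

-- ===== CLAIM (what is proved, stated in full; the proofs are below) =====
def Claim_equal_puntacion_y_consenso_dic : Prop := ∀ (motifs : List String) (k : Int), Dom_puntacion_y_consenso_dic motifs k → Pre_puntacion_y_consenso_dic motifs k → Spec_puntacion_y_consenso_dic motifs k (puntacion_y_consenso_dic motifs k)

-- ===== LEMMAS AND PROOFS =====

-- literal 4-key dict shape used to track A's profile through its loops
def qd (a c g t : List Int) : PySem.Dict Char (List Int) :=
  PySem.Dict.mk [('A', a), ('C', c), ('G', g), ('T', t)]

theorem init_fold (L : List Int) : ∀ (a c g t : List Int),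
    L.foldl (fun d _ => d.keys.foldl (fun d key => d.modify key [] (fun l => l ++ [0])) d)
      (qd a c g t)
    = qd (a ++ List.replicate L.length 0) (c ++ List.replicate L.length 0)
         (g ++ List.replicate L.length 0) (t ++ List.replicate L.length 0) := by
  induction L with
  | nil => intro a c g t; simp
  | cons x L ih =>
    intro a c g t
    show L.foldl _ (qd (a ++ [0]) (c ++ [0]) (g ++ [0]) (t ++ [0])) = _
    rw [ih]
    simp [List.replicate_succ, List.append_assoc]

-- one modify step of the fill loop on the 4-key shape
theorem modify_qd (a c g t : List Int) (ch : Char) (hch : ch ∈ (['A','C','G','T'] : List Char))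
    (f : List Int → List Int) :
    (qd a c g t).modify ch [] f =
      qd (if ch = 'A' then f a else a) (if ch = 'C' then f c else c)
         (if ch = 'G' then f g else g) (if ch = 'T' then f t else t) := by
  fin_cases hch <;> rfl

theorem fill_inner (m : String) (n : Nat) (I : List Int) : ∀ (v : Char → List Int),
    (∀ i ∈ I, 0 ≤ i ∧ i < (n : Int)) →
    (∀ X, (v X).length = n) →
    (∀ i ∈ I, (PySem.Str.pyGet? m i).getD ' ' ∈ (['A','C','G','T'] : List Char)) →
    ∃ v' : Char → List Int,
      I.foldl (fun d i =>
          d.modify ((PySem.Str.pyGet? m i).getD ' ') []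
            (fun l => PySem.List.pySetD l i (PySem.List.pyGetD l i 0 + 1)))
        (qd (v 'A') (v 'C') (v 'G') (v 'T'))
      = qd (v' 'A') (v' 'C') (v' 'G') (v' 'T') ∧
      (∀ X, (v' X).length = n) ∧
      (∀ X, ∀ j : Nat, j < n → PySem.List.pyGetD (v' X) (j : Int) 0 =
        PySem.List.pyGetD (v X) (j : Int) 0 +
          (I.countP (fun i => i == (j : Int) && ((PySem.Str.pyGet? m i).getD ' ' == X)) : Int)) := by
  induction I with
  | nil => intro v _ hlen _; exact ⟨v, rfl, hlen, by simp⟩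
  | cons i I ih =>
    intro v hrange hlen hch
    obtain ⟨hi0, hin⟩ := hrange i (by simp)
    have hchi : ((PySem.Str.pyGet? m i).getD ' ') ∈ (['A','C','G','T'] : List Char) :=
      hch i (by simp)
    set ch := (PySem.Str.pyGet? m i).getD ' ' with hchdef
    set v1 : Char → List Int := fun X =>
      if ch = X then PySem.List.pySetD (v X) i (PySem.List.pyGetD (v X) i 0 + 1) else v X with hv1
    have hstep : (qd (v 'A') (v 'C') (v 'G') (v 'T')).modify ch []
        (fun l => PySem.List.pySetD l i (PySem.List.pyGetD l i 0 + 1))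
        = qd (v1 'A') (v1 'C') (v1 'G') (v1 'T') := by
      rw [modify_qd _ _ _ _ _ hchi]
    have hlen1 : ∀ X, (v1 X).length = n := by
      intro X
      simp only [hv1]
      split
      · rw [PySem.List.length_pySetD]; exact hlen X
      · exact hlen X
    have hget1 : ∀ X, ∀ j : Nat, j < n → PySem.List.pyGetD (v1 X) (j : Int) 0 =
        PySem.List.pyGetD (v X) (j : Int) 0 +
          (if i == (j : Int) && (ch == X) then (1:Int) else 0) := by
      intro X j hj
      simp only [hv1]
      have hlt : i.toNat < (v X).length := by rw [hlen X]; omega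
      by_cases hXc : ch = X
      · rw [if_pos hXc]
        rw [show i = ((i.toNat : Nat) : Int) from by omega,
            PySem.List.pyGetD_pySetD_natCast _ _ _ _ _ hlt]
        by_cases hji : j = i.toNat
        · simp [hji, hXc]
        · rw [if_neg hji, if_neg]
          · ring
          · simp only [Bool.and_eq_true, beq_iff_eq]
            rintro ⟨h1, -⟩
            exact hji (by omega)
      · rw [if_neg hXc, if_neg]
        · ring
        · simp only [Bool.and_eq_true, beq_iff_eq]
          rintro ⟨-, h2⟩
          exact hXc h2
    obtain ⟨v', he, hl', hg'⟩ := ih v1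
      (fun x hx => hrange x (List.mem_cons_of_mem _ hx)) hlen1
      (fun x hx => hch x (List.mem_cons_of_mem _ hx))
    refine ⟨v', ?_, hl', ?_⟩
    · rw [List.foldl_cons]
      show List.foldl _ ((qd (v 'A') (v 'C') (v 'G') (v 'T')).modify ch []
        (fun l => PySem.List.pySetD l i (PySem.List.pyGetD l i 0 + 1))) I = _
      rw [hstep, he]
    · intro X j hj
      rw [hg' X j hj, hget1 X j hj, List.countP_cons]
      push_cast
      by_cases hc : (i == (j : Int) && (ch == X)) = true
      all_goals
        have hc2 : (i == (j : Int) && ((PySem.Str.pyGet? m i).getD ' ' == X)) = true ↔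
            (i == (j : Int) && (ch == X)) = true := by rw [← hchdef]
      · simp only [hc, hc2, if_pos]
        ring
      · simp only [Bool.not_eq_true] at hc
        simp only [hc, hc2, Bool.false_eq_true, if_false]
        ring

theorem max4 (f : Char → Nat) : (PySem.List.max? ['A','C','G','T'] f).getD 'A' =
    if f 'A' < f 'C' then (if f 'C' < f 'G' then (if f 'G' < f 'T' then 'T' else 'G') else if f 'C' < f 'T' then 'T' else 'C')
    else (if f 'A' < f 'G' then (if f 'G' < f 'T' then 'T' else 'G') else if f 'A' < f 'T' then 'T' else 'A') := by
  simp only [PySem.List.max?, List.foldl]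
  split_ifs <;> (try simp_all) <;>
    split_ifs <;> (try simp_all) <;> (try omega) <;>
    split_ifs <;> simp_all <;> omega

-- A's strict-`>` scan over the four counts picks the first base with the maximal
-- count (the scan starts at 0, so it needs one positive count), i.e. B's max-by-key
theorem pick4 (a c g t : Nat) (h : 0 < a + c + g + t) (b0 : Char) (f : Char → Nat)
    (hA : f 'A' = a) (hC : f 'C' = c) (hG : f 'G' = g) (hT : f 'T' = t) :
    ([('A', (a : Int)), ('C', (c : Int)), ('G', (g : Int)), ('T', (t : Int))].foldl
      (fun (p : Int × Char) kv => if p.1 < kv.2 then (kv.2, kv.1) else p) (0, b0))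
    = ((f ((PySem.List.max? ['A','C','G','T'] f).getD 'A') : Int),
       (PySem.List.max? ['A','C','G','T'] f).getD 'A') := by
  rw [max4]
  simp only [List.foldl, hA, hC, hG, hT]
  split_ifs <;> simp_all

theorem count4 (col : List Char) (h : ∀ x ∈ col, x ∈ (['A','C','G','T'] : List Char)) :
    col.count 'A' + col.count 'C' + col.count 'G' + col.count 'T' = col.length := by
  induction col with
  | nil => simp
  | cons x xs ih =>
    have hx := h x (by simp)
    have ihx := ih (fun y hy => h y (List.mem_cons_of_mem _ hy))
    fin_cases hx <;> simp <;> omega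

theorem countP_pyRange_eq (n j : Nat) (hj : j < n) (p : Int → Bool) :
    (PySem.List.pyRange 0 (n : Int)).countP (fun i => i == (j : Int) && p i)
      = if p (j : Int) then 1 else 0 := by
  rw [PySem.List.pyRange_zero_natCast, List.countP_map]
  have hpt : ((fun i => i == (j : Int) && p i) ∘ fun a : Nat => (a : Int))
      = fun a : Nat => (a == j && p (j : Int)) := by
    funext a
    by_cases ha : a = j
    · simp [ha]
    · have ha' : ¬ ((a : Int) = (j : Int)) := fun h => ha (by exact_mod_cast h)
      have e1 : ((a : Int) == (j : Int)) = false := by simpa using ha'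
      have e2 : (a == j) = false := by simpa using ha
      simp only [Function.comp, e1, e2, Bool.false_and]
  rw [hpt]
  by_cases hp : p (j : Int)
  · simp only [hp, Bool.and_true, if_true]
    exact List.count_eq_one_of_mem List.nodup_range (List.mem_range.2 hj)
  · simp [hp]

theorem fill_outer (n : Nat) (ms : List String) : ∀ (v : Char → List Int),
    (∀ X, (v X).length = n) →
    (∀ m ∈ ms, ∀ i ∈ PySem.List.pyRange 0 (n : Int),
      (PySem.Str.pyGet? m i).getD ' ' ∈ (['A','C','G','T'] : List Char)) →
    ∃ v' : Char → List Int,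
      pvAFill ms (n : Int) (qd (v 'A') (v 'C') (v 'G') (v 'T'))
        = qd (v' 'A') (v' 'C') (v' 'G') (v' 'T') ∧
      (∀ X, (v' X).length = n) ∧
      (∀ X, ∀ j : Nat, j < n → PySem.List.pyGetD (v' X) (j : Int) 0 =
        PySem.List.pyGetD (v X) (j : Int) 0 +
          ((ms.map (fun m => (PySem.Str.pyGet? m (j : Int)).getD ' ')).count X : Int)) := by
  induction ms with
  | nil => intro v hlen _; exact ⟨v, rfl, hlen, by simp⟩
  | cons m ms ih =>
    intro v hlen hch
    have hrange : ∀ i ∈ PySem.List.pyRange 0 (n : Int), 0 ≤ i ∧ i < (n : Int) := by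
      intro i hi
      have := (PySem.List.mem_pyRange_one).1 hi
      omega
    obtain ⟨v1, he1, hl1, hg1⟩ := fill_inner m n (PySem.List.pyRange 0 (n : Int)) v
      hrange hlen (hch m (by simp))
    obtain ⟨v', he', hl', hg'⟩ := ih v1 hl1
      (fun x hx => hch x (List.mem_cons_of_mem _ hx))
    refine ⟨v', ?_, hl', ?_⟩
    · show pvAFill ms (n : Int) _ = _
      rw [← he']
      show pvAFill ms (n : Int) (List.foldl _ (qd (v 'A') (v 'C') (v 'G') (v 'T'))
        (PySem.List.pyRange 0 (n : Int))) = _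
      rw [he1]
    · intro X j hj
      rw [hg' X j hj, hg1 X j hj]
      rw [countP_pyRange_eq n j hj (fun i => (PySem.Str.pyGet? m i).getD ' ' == X)]
      rw [List.map_cons, List.count_cons]
      by_cases hx : (PySem.Str.pyGet? m (j : Int)).getD ' ' == X
      · simp; ring
      · simp only [Bool.not_eq_true] at hx
        simp
        ring

theorem final_fold (motifs : List String) (n : Nat) (v' : Char → List Int)
    (hpos : motifs ≠ [])
    (hcnt : ∀ X, ∀ j : Nat, j < n → PySem.List.pyGetD (v' X) (j : Int) 0 =
      ((motifs.map (fun m => (PySem.Str.pyGet? m (j : Int)).getD ' ')).count X : Int))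
    (hch : ∀ m ∈ motifs, ∀ j : Nat, j < n →
      (PySem.Str.pyGet? m (j : Int)).getD ' ' ∈ (['A','C','G','T'] : List Char)) :
    ∀ (L : List Int), (∀ col ∈ L, 0 ≤ col ∧ col < (n : Int)) →
    ∀ (s : Int) (cs : List Char) (b : Char),
      (L.foldl (fun (st : Int × List Char × Char) col =>
          let r := (qd (v' 'A') (v' 'C') (v' 'G') (v' 'T')).items.foldl
            (fun (p : Int × Char) kv =>
              if p.1 < PySem.List.pyGetD kv.2 col 0 then (PySem.List.pyGetD kv.2 col 0, kv.1) else p)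
            (0, st.2.2)
          (st.1 + r.1, st.2.1 ++ [r.2], r.2)) (s, cs, b)).1
        = (L.foldl (fun (st : Int × List Char) col =>
            let column := motifs.map (fun m => (PySem.Str.pyGet? m col).getD ' ')
            let best := (PySem.List.max? ['A', 'C', 'G', 'T'] (fun b => column.count b)).getD 'A'
            (st.1 + (column.count best : Int), st.2 ++ [best])) (s, cs)).1 ∧
      (L.foldl (fun (st : Int × List Char × Char) col =>
          let r := (qd (v' 'A') (v' 'C') (v' 'G') (v' 'T')).items.foldl
            (fun (p : Int × Char) kv =>
              if p.1 < PySem.List.pyGetD kv.2 col 0 then (PySem.List.pyGetD kv.2 col 0, kv.1) else p)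
            (0, st.2.2)
          (st.1 + r.1, st.2.1 ++ [r.2], r.2)) (s, cs, b)).2.1
        = (L.foldl (fun (st : Int × List Char) col =>
            let column := motifs.map (fun m => (PySem.Str.pyGet? m col).getD ' ')
            let best := (PySem.List.max? ['A', 'C', 'G', 'T'] (fun b => column.count b)).getD 'A'
            (st.1 + (column.count best : Int), st.2 ++ [best])) (s, cs)).2 := by
  intro L
  induction L with
  | nil => exact fun _ s cs b => ⟨rfl, rfl⟩
  | cons col L ih =>
    intro hran s cs b
    obtain ⟨hc0, hcn⟩ := hran col (by simp)
    have hjlt : col.toNat < n := by omega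
    have hcol : col = ((col.toNat : Nat) : Int) := by omega
    have hcX : ∀ X, PySem.List.pyGetD (v' X) col 0 =
        ((motifs.map (fun m => (PySem.Str.pyGet? m col).getD ' ')).count X : Int) := by
      intro X
      rw [hcol, hcnt X _ hjlt]
    have hallACGT : ∀ x ∈ motifs.map (fun m => (PySem.Str.pyGet? m col).getD ' '),
        x ∈ (['A','C','G','T'] : List Char) := by
      intro x hx
      obtain ⟨m, hm, rfl⟩ := List.mem_map.1 hx
      rw [hcol]
      exact hch m hm _ hjlt
    have hsum : 0 < (motifs.map (fun m => (PySem.Str.pyGet? m col).getD ' ')).count 'A'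
        + (motifs.map (fun m => (PySem.Str.pyGet? m col).getD ' ')).count 'C'
        + (motifs.map (fun m => (PySem.Str.pyGet? m col).getD ' ')).count 'G'
        + (motifs.map (fun m => (PySem.Str.pyGet? m col).getD ' ')).count 'T' := by
      rw [count4 _ hallACGT, List.length_map]
      exact List.length_pos_iff.2 hpos
    have hpick := pick4 _ _ _ _ hsum b
      (fun X => (motifs.map (fun m => (PySem.Str.pyGet? m col).getD ' ')).count X)
      rfl rfl rfl rfl
    have hr : ((qd (v' 'A') (v' 'C') (v' 'G') (v' 'T')).items.foldl
        (fun (p : Int × Char) kv =>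
          if p.1 < PySem.List.pyGetD kv.2 col 0 then (PySem.List.pyGetD kv.2 col 0, kv.1) else p)
        (0, b))
        = (((motifs.map (fun m => (PySem.Str.pyGet? m col).getD ' ')).count
              ((PySem.List.max? ['A', 'C', 'G', 'T']
                (fun X => (motifs.map (fun m => (PySem.Str.pyGet? m col).getD ' ')).count X)).getD 'A') : Int),
           (PySem.List.max? ['A', 'C', 'G', 'T']
                (fun X => (motifs.map (fun m => (PySem.Str.pyGet? m col).getD ' ')).count X)).getD 'A') := by
      show ([('A', v' 'A'), ('C', v' 'C'), ('G', v' 'G'), ('T', v' 'T')].foldl _ (0, b)) = _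
      simp only [List.foldl]
      rw [hcX 'A', hcX 'C', hcX 'G', hcX 'T']
      simp only [List.foldl] at hpick
      exact hpick
    rw [List.foldl_cons, List.foldl_cons]
    show (L.foldl _ (s + _, cs ++ _, _)).1 = _ ∧ (L.foldl _ (s + _, cs ++ _, _)).2.1 = _
    rw [hr]
    exact ih (fun x hx => hran x (List.mem_cons_of_mem _ hx)) _ _ _

-- ===== VERDICT (by name: the statement is the Claim_ definition above) =====
theorem puntacion_y_consenso_dic_spec : Claim_equal_puntacion_y_consenso_dic := by
  unfold Claim_equal_puntacion_y_consenso_dic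
  intro motifs k _ hpre
  unfold Spec_puntacion_y_consenso_dic
  by_cases hk : k ≤ 0
  · have hr : PySem.List.pyRange 0 k = [] := by
      rw [PySem.List.pyRange_one, show (k - 0).toNat = 0 by omega]
      rfl
    unfold puntacion_y_consenso_dic pvAScore puntacion_y_consenso_dic_alt
    rw [hr]
    rfl
  · rw [not_le] at hk
    rcases hpre with h0 | ⟨hne, hall⟩
    · omega
    have hm : ∀ m ∈ motifs, k ≤ (m.toList.length : Int) ∧
        ∀ c ∈ m.toList.take k.toNat, c ∈ (['A', 'C', 'G', 'T'] : List Char) := by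
      intro m hm'
      have hx := List.all_eq_true.1 hall m hm'
      simp only [Bool.and_eq_true, decide_eq_true_eq, List.all_eq_true,
        List.contains_iff_mem] at hx
      exact hx
    set n := k.toNat with hn
    have hkn : k = (n : Int) := by omega
    have hch : ∀ m ∈ motifs, ∀ j : Nat, j < n →
        (PySem.Str.pyGet? m (j : Int)).getD ' ' ∈ (['A','C','G','T'] : List Char) := by
      intro m hm' j hj
      obtain ⟨hlen, htake⟩ := hm m hm'
      have hjl : j < m.toList.length := by omega
      have hjk : j < (m.toList.take n).length := by
        simp only [List.length_take]
        omega
      have hg : PySem.Str.pyGet? m (j : Int) = some (m.toList[j]'hjl) := by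
        rw [PySem.Str.pyGet?_natCast, List.getElem?_eq_getElem hjl]
      rw [hg, Option.getD_some]
      have ht : (m.toList.take n)[j]'hjk = m.toList[j]'hjl := List.getElem_take
      exact ht ▸ htake _ (List.getElem_mem hjk)
    have hinit : pvAInit k = qd (List.replicate n 0) (List.replicate n 0)
        (List.replicate n 0) (List.replicate n 0) := by
      unfold pvAInit
      have h0' : PySem.Dict.ofList [('A', ([] : List Int)), ('C', []), ('G', []), ('T', [])]
          = qd [] [] [] [] := rfl
      rw [h0', init_fold]
      have hl : (PySem.List.pyRange 0 k).length = n := by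
        rw [PySem.List.length_pyRange_one]
        omega
      rw [hl]
      simp
    have hch' : ∀ m ∈ motifs, ∀ i ∈ PySem.List.pyRange 0 (n : Int),
        (PySem.Str.pyGet? m i).getD ' ' ∈ (['A','C','G','T'] : List Char) := by
      intro m hm' i hi
      have hb := (PySem.List.mem_pyRange_one).1 hi
      have hcol : i = ((i.toNat : Nat) : Int) := by omega
      rw [hcol]
      exact hch m hm' i.toNat (by omega)
    obtain ⟨v', hfill, -, hgv⟩ :=
      fill_outer n motifs (fun _ => List.replicate n (0 : Int)) (by simp) hch'
    have hcnt : ∀ X, ∀ j : Nat, j < n → PySem.List.pyGetD (v' X) (j : Int) 0 =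
        ((motifs.map (fun m => (PySem.Str.pyGet? m (j : Int)).getD ' ')).count X : Int) := by
      intro X j hj
      rw [hgv X j hj, PySem.List.pyGetD_natCast]
      simp [List.getD_eq_getElem?_getD, hj]
    have hfin := final_fold motifs n v' hne hcnt hch (PySem.List.pyRange 0 (n : Int))
      (by
        intro col hcol
        have := (PySem.List.mem_pyRange_one).1 hcol
        omega) 0 [] 'A'
    unfold puntacion_y_consenso_dic pvAScore puntacion_y_consenso_dic_alt
    rw [hinit, hkn, hfill]
    exact Prod.ext hfin.1 (congrArg String.ofList hfin.2)
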